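-- pv_equiv track=rewrite | github.com/luisalourenco/AdventOfCode2019 | 18/part1.py | gatherLocations
-- ===== SOURCE A (Python) =====
-- def gatherLocations(map):
--     keys = []
--     doors = []
--     entrance = None
--     sizeX = len(map[0])
--     sizeY = len(map)
--
--     for j in range(sizeY):
--         for i in range(sizeX):
--             obj = map[j][i]
--             if obj != '@':
--                 if str.islower(obj):
--                     #keys[obj] = (i,j)
--                     keys.append((i,j))
--                 elif str.isupper(obj):
--                     #doors[obj] = (i,j)
--                     doors.append((i,j))
--             else:
--                 entrance = (i,j)
--     return keys, doors, entrance
-- ===== SOURCE B (Python) =====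
-- def gatherLocations(map):
--     # three independent scans of the w x h grid; entrance is the last '@' in row-major order
--     w, h = len(map[0]), len(map)
--     keys = [(i, j) for j in range(h) for i in range(w) if map[j][i].islower()]
--     doors = [(i, j) for j in range(h) for i in range(w) if map[j][i].isupper()]
--     ats = [(i, j) for j in range(h) for i in range(w) if map[j][i] == '@']
--     return keys, doors, ats[-1] if ats else None
-- ===== Notes on version B (the rewrite author's own statement) =====
-- stated objective: simpler
-- what changed: One nested double loop threading a (keys, doors, entrance) state through an if/elif/else cascade is replaced by three independent comprehension scans of the grid plus 'last @ or None' for the entrance; Pre_ excludes only the inputs (empty map, or a row shorter than the first) on which both programs raise IndexError.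
import Mathlib
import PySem

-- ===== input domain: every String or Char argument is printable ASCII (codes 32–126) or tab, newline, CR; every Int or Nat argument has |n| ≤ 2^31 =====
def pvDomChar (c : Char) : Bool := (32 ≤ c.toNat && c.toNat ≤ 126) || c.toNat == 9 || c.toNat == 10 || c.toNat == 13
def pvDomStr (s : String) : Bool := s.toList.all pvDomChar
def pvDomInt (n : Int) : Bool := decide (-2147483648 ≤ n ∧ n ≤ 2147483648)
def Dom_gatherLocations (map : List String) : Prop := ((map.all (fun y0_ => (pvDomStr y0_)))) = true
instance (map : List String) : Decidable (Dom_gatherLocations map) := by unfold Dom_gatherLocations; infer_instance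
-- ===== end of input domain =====

-- B replaces A's single state-threading double loop by three independent comprehension
-- scans of the w x h grid (keys / doors / all '@' cells, entrance = last '@' or none).

-- ===== PORT A =====
-- the body of A's innermost 'if' cascade, as a named helper (used literally by the loop below)
def aStep (j : Int) (st : (List (Int × Int)) × (List (Int × Int)) × (Option (Int × Int)))
    (i : Int) (obj : Char) : (List (Int × Int)) × (List (Int × Int)) × (Option (Int × Int)) :=
  if obj ≠ '@' then
    if PySem.Chars.islower obj then (st.1 ++ [(i, j)], st.2.1, st.2.2)
    else if PySem.Chars.isupper obj then (st.1, st.2.1 ++ [(i, j)], st.2.2)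
    else st
  else (st.1, st.2.1, some (i, j))

def gatherLocations (map : List String) : (List (Int × Int)) × (List (Int × Int)) × (Option (Int × Int)) :=
  let sizeX : Int := PySem.Str.len (PySem.List.pyGetD map 0 "")
  let sizeY : Int := (map.length : Int)
  (PySem.List.pyRange 0 sizeY 1).foldl (fun st j =>
      (PySem.List.pyRange 0 sizeX 1).foldl (fun st i =>
          aStep j st i (PySem.List.pyGetD (PySem.List.pyGetD map j "").toList i ' ')) st)
    ([], [], none)

-- ===== PORT B =====
-- one comprehension scan: all (i, j) with j in range(h), i in range(w) and p (map[j][i])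
def bScan (map : List String) (w h : Int) (p : Char → Bool) : List (Int × Int) :=
  (PySem.List.pyRange 0 h 1).flatMap (fun j =>
    (PySem.List.pyRange 0 w 1).filterMap (fun i =>
      if p (PySem.List.pyGetD (PySem.List.pyGetD map j "").toList i ' ') then some (i, j) else none))

def gatherLocations_alt (map : List String) : (List (Int × Int)) × (List (Int × Int)) × (Option (Int × Int)) :=
  let w : Int := PySem.Str.len (PySem.List.pyGetD map 0 "")
  let h : Int := (map.length : Int)
  let keys := bScan map w h PySem.Chars.islower
  let doors := bScan map w h PySem.Chars.isupper
  let ats := bScan map w h (fun c => c == '@')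
  (keys, doors, ats.getLast?)

-- ===== PRECONDITION & SPEC =====
-- Pre_ is exactly where both programs return: a non-empty map whose rows are all at least
-- as long as row 0 (both index every row at columns 0..len(map[0])-1, so an empty map or a
-- shorter row raises IndexError in A and in B alike).
def Pre_gatherLocations (map : List String) : Prop :=
  map ≠ [] ∧ ∀ s ∈ map, PySem.Str.len (map.headD "") ≤ PySem.Str.len s
instance (map : List String) : Decidable (Pre_gatherLocations map) := by
  unfold Pre_gatherLocations; infer_instance

def pvWitness_gatherLocations : List String := ["#a@", "#B."]

def Spec_gatherLocations (map : List String) (out : (List (Int × Int)) × (List (Int × Int)) × (Option (Int × Int))) : Prop := out = gatherLocations_alt map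
instance (map : List String) (out : (List (Int × Int)) × (List (Int × Int)) × (Option (Int × Int))) : Decidable (Spec_gatherLocations map out) := by unfold Spec_gatherLocations; infer_instance

-- ===== CLAIM (what is proved, stated in full; the proofs are below) =====
def Claim_equal_gatherLocations : Prop := ∀ (map : List String), Dom_gatherLocations map → Pre_gatherLocations map → Spec_gatherLocations map (gatherLocations map)

-- ===== LEMMAS AND PROOFS =====

-- the (i, j) cells of one row whose character satisfies p
def rowOf (p : Char → Bool) (j : Int) (cs : List Char) : List (Int × Int) :=
  (PySem.List.enumerate cs 0).filterMap (fun ic => if p ic.2 then some (ic.1, j) else none)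

lemma rowOf_append_singleton (p : Char → Bool) (j : Int) (cs : List Char) (c : Char) :
    rowOf p j (cs ++ [c]) =
      rowOf p j cs ++ (if p c then [((cs.length : Int), j)] else []) := by
  by_cases hp : p c <;>
    simp [rowOf, PySem.List.enumerate_append, PySem.List.enumerate_cons,
      PySem.List.enumerate_nil, List.filterMap_append, hp]

lemma islower_not_isupper (c : Char) (h : PySem.Chars.islower c = true) :
    PySem.Chars.isupper c = false := by
  simp [PySem.Chars.islower, PySem.Chars.isupper, Char.le_def, UInt32.le_iff_toNat_le] at *
  intro h1; omega

-- A's inner loop over one row equals appending that row's scans to the state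
lemma inner_loop_eq (cs : List Char) (j : Int) (w : Nat) (hw : w ≤ cs.length)
    (st : (List (Int × Int)) × (List (Int × Int)) × (Option (Int × Int))) :
    (PySem.List.pyRange 0 (w : Int) 1).foldl
        (fun st i => aStep j st i (PySem.List.pyGetD cs i ' ')) st
      = (st.1 ++ rowOf PySem.Chars.islower j (cs.take w),
         st.2.1 ++ rowOf PySem.Chars.isupper j (cs.take w),
         ((rowOf (fun c => c == '@') j (cs.take w)).getLast?).or st.2.2) := by
  induction w with
  | zero =>
      simp [PySem.List.pyRange_one_eq_nil (by omega : (0:Int) ≤ 0), rowOf]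
  | succ n ih =>
      have hn : n ≤ cs.length := by omega
      have hlt : n < cs.length := by omega
      have hcast : ((n + 1 : Nat) : Int) = (n : Int) + 1 := by push_cast; ring
      rw [hcast, PySem.List.pyRange_one_succ_right (by positivity), List.foldl_append,
        ih hn]
      have htake : cs.take (n + 1) = cs.take n ++ [cs[n]] := by
        rw [List.take_add_one, List.getElem?_eq_getElem hlt, Option.toList_some]
      have hget : PySem.List.pyGetD cs ((n : Nat) : Int) ' ' = cs[n] := by
        rw [PySem.List.pyGetD_natCast, List.getD_eq_getElem _ _ hlt]
      have hlen : (((cs.take n).length : Nat) : Int) = (n : Int) := by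
        rw [List.length_take_of_le hn]
      simp only [List.foldl_cons, List.foldl_nil, hget, htake,
        rowOf_append_singleton, List.getLast?_append, hlen]
      unfold aStep
      by_cases hat : cs[n] = '@'
      · have h1 : PySem.Chars.islower '@' = false := by decide
        have h2 : PySem.Chars.isupper '@' = false := by decide
        simp [hat, h1, h2]
      · by_cases hl : PySem.Chars.islower cs[n]
        · have h2 := islower_not_isupper cs[n] hl
          have hne : (cs[n] == '@') = false := by simp [hat]
          simp [hat, hl, h2, hne, List.append_assoc]
        · by_cases hu : PySem.Chars.isupper cs[n]
          · have hne : (cs[n] == '@') = false := by simp [hat]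
            simp [hat, hl, hu, hne, List.append_assoc]
          · have hne : (cs[n] == '@') = false := by simp [hat]
            simp [hat, hl, hu, hne]

-- A's outer loop over enumerated rows, generalized over the start index and the state
lemma outer_loop_eq (rows : List String) (w : Nat)
    (hw : ∀ s ∈ rows, w ≤ s.toList.length) (a : Int)
    (st : (List (Int × Int)) × (List (Int × Int)) × (Option (Int × Int))) :
    (PySem.List.enumerate rows a).foldl
        (fun st jr =>
          (PySem.List.pyRange 0 (w : Int) 1).foldl
            (fun st i => aStep jr.1 st i (PySem.List.pyGetD jr.2.toList i ' ')) st) st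
      = (st.1 ++ (PySem.List.enumerate rows a).flatMap
            (fun jr => rowOf PySem.Chars.islower jr.1 (jr.2.toList.take w)),
         st.2.1 ++ (PySem.List.enumerate rows a).flatMap
            (fun jr => rowOf PySem.Chars.isupper jr.1 (jr.2.toList.take w)),
         (((PySem.List.enumerate rows a).flatMap
            (fun jr => rowOf (fun c => c == '@') jr.1 (jr.2.toList.take w))).getLast?).or st.2.2) := by
  induction rows generalizing a st with
  | nil => simp [PySem.List.enumerate_nil]
  | cons r rows ih =>
      rw [PySem.List.enumerate_cons]
      simp only [List.foldl_cons]
      rw [inner_loop_eq r.toList a w (hw r (by simp)) st,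
        ih (fun s hs => hw s (by simp [hs])) (a + 1)]
      simp [List.getLast?_append, Option.or_assoc, List.append_assoc]

-- the outer 'for j in range(len(map))' loop with map[j] lookups IS the loop over enumerate(map)
lemma outer_range_eq_enumerate (map : List String) (w : Int)
    (st : (List (Int × Int)) × (List (Int × Int)) × (Option (Int × Int))) :
    (PySem.List.pyRange 0 (map.length : Int) 1).foldl
        (fun st j =>
          (PySem.List.pyRange 0 w 1).foldl
            (fun st i => aStep j st i (PySem.List.pyGetD (PySem.List.pyGetD map j "").toList i ' ')) st) st
      = (PySem.List.enumerate map 0).foldl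
          (fun st jr =>
            (PySem.List.pyRange 0 w 1).foldl
              (fun st i => aStep jr.1 st i (PySem.List.pyGetD jr.2.toList i ' ')) st) st := by
  rw [PySem.List.enumerate_eq_map_pyRange map "", List.foldl_map]
  simp [PySem.List.len]

-- B's inner comprehension over range(w) is the row's take-w scan
lemma inner_scan_eq (cs : List Char) (j : Int) (w : Nat) (hw : w ≤ cs.length)
    (p : Char → Bool) :
    (PySem.List.pyRange 0 (w : Int) 1).filterMap
        (fun i => if p (PySem.List.pyGetD cs i ' ') then some (i, j) else none)
      = rowOf p j (cs.take w) := by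
  induction w with
  | zero =>
      simp [PySem.List.pyRange_one_eq_nil (by omega : (0:Int) ≤ 0), rowOf]
  | succ n ih =>
      have hn : n ≤ cs.length := by omega
      have hlt : n < cs.length := by omega
      have hcast : ((n + 1 : Nat) : Int) = (n : Int) + 1 := by push_cast; ring
      have htake : cs.take (n + 1) = cs.take n ++ [cs[n]] := by
        rw [List.take_add_one, List.getElem?_eq_getElem hlt, Option.toList_some]
      have hget : PySem.List.pyGetD cs ((n : Nat) : Int) ' ' = cs[n] := by
        rw [PySem.List.pyGetD_natCast, List.getD_eq_getElem _ _ hlt]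
      have hlen : (((cs.take n).length : Nat) : Int) = (n : Int) := by
        rw [List.length_take_of_le hn]
      rw [hcast, PySem.List.pyRange_one_succ_right (by positivity),
        List.filterMap_append, ih hn, htake, rowOf_append_singleton]
      by_cases hp : p cs[n] <;> simp [hget, hp, hn]

-- B's scan equals the flatMap of per-row take-w scans over the enumerated rows
lemma bScan_eq (map : List String) (w : Nat)
    (hw : ∀ s ∈ map, w ≤ s.toList.length) (p : Char → Bool) :
    bScan map (w : Int) (map.length : Int) p
      = (PySem.List.enumerate map 0).flatMap
          (fun jr => rowOf p jr.1 (jr.2.toList.take w)) := by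
  unfold bScan
  rw [PySem.List.enumerate_eq_map_pyRange map "", List.flatMap_map]
  simp only [PySem.List.len]
  refine List.flatMap_congr ?_
  intro j hj
  obtain ⟨hj0, hjlt⟩ := (PySem.List.mem_pyRange_one).mp hj
  have hmem : PySem.List.pyGetD map j "" ∈ map := by
    refine PySem.List.pyGetD_mem map "" ?_
    unfold PySem.Raise.InRange
    omega
  exact inner_scan_eq _ j w (hw _ hmem) p

-- ===== VERDICT (by name: the statement is the Claim_ definition above) =====
theorem gatherLocations_spec : Claim_equal_gatherLocations := by
  intro map _ hpre
  obtain ⟨hne, hlen⟩ := hpre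
  obtain ⟨r, rows, rfl⟩ := List.exists_cons_of_ne_nil hne
  unfold Spec_gatherLocations gatherLocations gatherLocations_alt
  have h0 : PySem.List.pyGetD (r :: rows) 0 "" = r := PySem.List.pyGetD_zero_cons r rows ""
  rw [h0]
  have hw : PySem.Str.len r = (r.toList.length : Int) := PySem.Str.len_eq r
  have hrows : ∀ s ∈ (r :: rows), r.toList.length ≤ s.toList.length := by
    intro s hs
    have := hlen s hs
    simp only [List.headD_cons, PySem.Str.len_eq] at this
    exact_mod_cast this
  rw [hw, outer_range_eq_enumerate,
    outer_loop_eq (r :: rows) r.toList.length hrows 0 ([], [], none)]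
  have hb := fun p => bScan_eq (r :: rows) r.toList.length hrows p
  simp only [String.length_toList, List.length_cons, Nat.cast_add, Nat.cast_one] at hb
  simp [hb]
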